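-- pv_equiv track=rewrite | github.com/imvulpi/mastervault | developer_tools/translation/subcommands/check.py | create_progress_bar
-- ===== SOURCE A (Python) =====
-- def create_progress_bar(completion):
--     progress = ""
--     for i in range(10):
--         if completion >= 10:
--             progress += "_ "
--         else:
--             progress += "  "
--         completion -= 10
--     progress_bar = "[ " + progress + "]"
--     return progress_bar
-- ===== SOURCE B (Python) =====
-- def create_progress_bar(completion):
--     n = min(10, max(0, completion // 10))
--     return "[ " + "_ " * n + "  " * (10 - n) + "]"
-- ===== Notes on version B (the rewrite author's own statement) =====
-- stated objective: simpler
-- what changed: Replaces the ten-iteration mutate-and-append loop (which decrements completion and grows the string each step) by computing the filled-segment count once via clamped floor division and constructing the bar directly with string repetition.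
import Mathlib
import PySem

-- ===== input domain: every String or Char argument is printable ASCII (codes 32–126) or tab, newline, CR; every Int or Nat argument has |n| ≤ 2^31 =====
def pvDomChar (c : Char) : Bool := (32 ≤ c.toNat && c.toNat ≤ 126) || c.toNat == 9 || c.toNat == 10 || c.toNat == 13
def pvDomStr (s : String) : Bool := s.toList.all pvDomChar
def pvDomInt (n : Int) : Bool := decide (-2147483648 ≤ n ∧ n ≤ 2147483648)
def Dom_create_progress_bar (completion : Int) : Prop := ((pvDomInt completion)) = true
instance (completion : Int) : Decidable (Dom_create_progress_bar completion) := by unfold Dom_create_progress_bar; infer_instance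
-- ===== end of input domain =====

-- B replaces A's interleaved mutate-and-append loop by computing the filled-segment
-- count once (clamped floor division) and building the bar by string repetition (objective: simpler).

-- ===== PORT A =====
-- the for-loop as structural recursion over the range list; string '+=' ported on List Char
def cpbLoop : List Int → List Char × Int → List Char × Int
  | [], st => st
  | _ :: rest, (progress, completion) =>
      cpbLoop rest
        ((if completion ≥ 10 then progress ++ ['_', ' '] else progress ++ [' ', ' ']),
         completion - 10)

def create_progress_bar (completion : Int) : String :=
  let st := cpbLoop (PySem.List.pyRange 0 10 1) ([], completion)
  String.ofList (('[' :: ' ' :: st.1) ++ [']'])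

-- ===== PORT B =====
-- "_ " * n ported as (List.replicate n.toNat ['_',' ']).flatten (Python's negative count → empty = toNat)
def create_progress_bar_alt (completion : Int) : String :=
  let n : Int := min 10 (max 0 (PySem.Int.floordiv completion 10))
  String.ofList (('[' :: ' ' ::
    ((List.replicate n.toNat ['_', ' ']).flatten ++ (List.replicate (10 - n).toNat [' ', ' ']).flatten)) ++ [']'])

-- ===== PRECONDITION & SPEC =====
def Spec_create_progress_bar (completion : Int) (out : String) : Prop := out = create_progress_bar_alt completion
instance (completion : Int) (out : String) : Decidable (Spec_create_progress_bar completion out) := by unfold Spec_create_progress_bar; infer_instance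

-- ===== CLAIM (what is proved, stated in full; the proofs are below) =====
def Claim_equal_create_progress_bar : Prop := ∀ (completion : Int), Dom_create_progress_bar completion → Spec_create_progress_bar completion (create_progress_bar completion)

-- ===== LEMMAS AND PROOFS =====

-- loop invariant: after running over r, the bar holds min r.length (clamp(cc/10)) filled segments
theorem cpbLoop_spec (r : List Int) (p : List Char) (cc : Int) :
    (cpbLoop r (p, cc)).1 =
      p ++ (List.replicate (min r.length ((max 0 (cc / 10)).toNat)) ['_', ' ']).flatten
        ++ (List.replicate (r.length - min r.length ((max 0 (cc / 10)).toNat)) [' ', ' ']).flatten := by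
  induction r generalizing p cc with
  | nil => simp [cpbLoop]
  | cons x rest ih =>
    by_cases h : cc ≥ 10
    · have h1 : (max 0 (cc / 10)).toNat = (max 0 ((cc - 10) / 10)).toNat + 1 := by omega
      have h2 : min (rest.length + 1) ((max 0 ((cc - 10) / 10)).toNat + 1)
          = min rest.length ((max 0 ((cc - 10) / 10)).toNat) + 1 := by omega
      have h3 : rest.length + 1 - (min rest.length ((max 0 ((cc - 10) / 10)).toNat) + 1)
          = rest.length - min rest.length ((max 0 ((cc - 10) / 10)).toNat) := by omega
      simp only [cpbLoop, if_pos h, ih, List.length_cons, h1, h2, h3,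
        List.replicate_succ, List.flatten_cons, List.append_assoc]
    · have h1 : (max 0 (cc / 10)).toNat = 0 := by omega
      have h2 : (max 0 ((cc - 10) / 10)).toNat = 0 := by omega
      simp only [cpbLoop, if_neg h, ih, List.length_cons, h1, h2, Nat.min_zero,
        List.replicate_zero, List.flatten_nil, List.append_nil,
        Nat.sub_zero, List.replicate_succ, List.flatten_cons, List.append_assoc]

theorem cpb_eq (c : Int) : create_progress_bar c = create_progress_bar_alt c := by
  unfold create_progress_bar create_progress_bar_alt
  dsimp only
  rw [PySem.Int.floordiv_eq_ediv_of_pos (by norm_num)]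
  rw [show PySem.List.pyRange 0 10 1 = [0,1,2,3,4,5,6,7,8,9] from by decide]
  rw [cpbLoop_spec]
  have e1 : min ([0,1,2,3,4,5,6,7,8,9] : List Int).length ((max 0 (c / 10)).toNat)
      = (min 10 (max 0 (c / 10))).toNat := by simp; omega
  have e2 : ([0,1,2,3,4,5,6,7,8,9] : List Int).length - (min 10 (max 0 (c / 10))).toNat
      = ((10 : Int) - min 10 (max 0 (c / 10))).toNat := by simp; omega
  rw [e1, e2]
  simp [List.append_assoc]

-- ===== VERDICT (by name: the statement is the Claim_ definition above) =====
theorem create_progress_bar_spec : Claim_equal_create_progress_bar := by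
  intro c _
  exact cpb_eq c
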